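-- pv_equiv track=rewrite | github.com/ezequiasnascimento/Problemas-Com-Matrizes | Problema5.py | retomandoCusto
-- ===== SOURCE A (Python) =====
-- def retomandoCusto(matriz,letras):
--     soma = 0
--     if len(matriz)==1:
--       for x in range(0,len(matriz[0])):
--           for z in letras:
--               if matriz[0][x]==z:
--                   soma+=(1+x+1)
--               else:
--                   soma+=0
--     else:
--       for i in range(0,len(matriz)):
--           for x in range(0,len(matriz[0])):
--               for z in letras:
--                   if matriz[i][x]==z:
--                       soma+=(i+1+x+1)
--                   else:
--                       soma+=0
--     return soma
-- ===== SOURCE B (Python) =====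
-- def retomandoCusto(matriz, letras):
--     cnt = {}
--     for z in letras:
--         cnt[z] = cnt.get(z, 0) + 1
--     if not matriz:
--         return 0
--     ncols = len(matriz[0])
--     rowsum = sum((i + 1) * sum(cnt.get(matriz[i][x], 0) for x in range(ncols))
--                  for i in range(len(matriz)))
--     colsum = sum((x + 1) * sum(cnt.get(matriz[i][x], 0) for i in range(len(matriz)))
--                  for x in range(ncols))
--     return rowsum + colsum
-- ===== Notes on version B (the rewrite author's own statement) =====
-- stated objective: faster
-- what changed: Instead of A's per-cell inner scan over letras with the combined weight i+1+x+1, B builds a letter-multiplicity counter once and computes two separately weighted sums (row-weighted and column-weighted), exploiting that the weight (i+1)+(x+1) splits into a row part and a column part.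
-- outside the precondition, e.g. on retomandoCusto([['a', 'b'], ['c']], ''): A returns 0, B raises IndexError
import Mathlib
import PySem

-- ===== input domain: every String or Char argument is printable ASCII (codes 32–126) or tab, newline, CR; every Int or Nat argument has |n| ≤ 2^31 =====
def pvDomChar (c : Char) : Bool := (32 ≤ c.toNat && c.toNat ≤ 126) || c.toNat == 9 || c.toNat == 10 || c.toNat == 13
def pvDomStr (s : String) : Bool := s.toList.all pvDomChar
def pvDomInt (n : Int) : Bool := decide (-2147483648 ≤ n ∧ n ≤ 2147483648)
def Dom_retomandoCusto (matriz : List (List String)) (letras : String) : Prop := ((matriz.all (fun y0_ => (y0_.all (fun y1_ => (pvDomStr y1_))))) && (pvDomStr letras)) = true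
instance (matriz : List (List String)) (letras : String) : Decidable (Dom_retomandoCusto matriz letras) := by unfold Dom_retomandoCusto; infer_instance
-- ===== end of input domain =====

-- B replaces A's per-cell scan of `letras` and combined weight i+1+x+1 by a letter counter built
-- once plus separate row-weighted and column-weighted sums (objective: faster, letter scan per cell removed).
-- String equality `cell == z` is ported as equality of the `.toList` character lists (exact).

-- ===== PORT A =====
def retomandoCusto (matriz : List (List String)) (letras : String) : Int :=
  if matriz.length == 1 then
    (PySem.List.pyRange 0 ((PySem.List.pyGetD matriz 0 []).length : Int) 1).foldl (fun soma x =>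
      letras.toList.foldl (fun soma z =>
        if (PySem.List.pyGetD (PySem.List.pyGetD matriz 0 []) x "").toList = [z]
        then soma + (1 + x + 1) else soma + 0) soma) 0
  else
    (PySem.List.pyRange 0 (matriz.length : Int) 1).foldl (fun soma i =>
      (PySem.List.pyRange 0 ((PySem.List.pyGetD matriz 0 []).length : Int) 1).foldl (fun soma x =>
        letras.toList.foldl (fun soma z =>
          if (PySem.List.pyGetD (PySem.List.pyGetD matriz i []) x "").toList = [z]
          then soma + (i + 1 + x + 1) else soma + 0) soma) soma) 0

-- ===== PORT B =====
def retomandoCusto_alt (matriz : List (List String)) (letras : String) : Int :=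
  let cnt : PySem.Dict (List Char) Int :=
    letras.toList.foldl (fun d z => d.insert [z] (d.getD [z] 0 + 1)) PySem.Dict.empty
  if matriz.isEmpty then 0
  else
    let nrows : Int := matriz.length
    let ncols : Int := (PySem.List.pyGetD matriz 0 []).length
    let rowsum := ((PySem.List.pyRange 0 nrows 1).map (fun i =>
      (i + 1) * ((PySem.List.pyRange 0 ncols 1).map (fun x =>
        cnt.getD (PySem.List.pyGetD (PySem.List.pyGetD matriz i []) x "").toList 0)).sum)).sum
    let colsum := ((PySem.List.pyRange 0 ncols 1).map (fun x =>
      (x + 1) * ((PySem.List.pyRange 0 nrows 1).map (fun i =>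
        cnt.getD (PySem.List.pyGetD (PySem.List.pyGetD matriz i []) x "").toList 0)).sum)).sum
    rowsum + colsum

-- ===== PRECONDITION & SPEC =====
-- Pre_ excludes ragged matrices (some row shorter than row 0, whose length ranges the column
-- loop): A raises IndexError there whenever letras is non-empty, and for empty letras A returns 0
-- without reading any cell while B reads every cell and itself raises IndexError.
def Pre_retomandoCusto (matriz : List (List String)) (letras : String) : Prop :=
  ∀ row ∈ matriz, (matriz.headD []).length ≤ row.length
instance (matriz : List (List String)) (letras : String) : Decidable (Pre_retomandoCusto matriz letras) := by unfold Pre_retomandoCusto; infer_instance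

def pvWitness_retomandoCusto : List (List String) × String := ([["a", "b"], ["b", "c"]], "ab")

def Spec_retomandoCusto (matriz : List (List String)) (letras : String) (out : Int) : Prop := out = retomandoCusto_alt matriz letras
instance (matriz : List (List String)) (letras : String) (out : Int) : Decidable (Spec_retomandoCusto matriz letras out) := by unfold Spec_retomandoCusto; infer_instance

-- ===== CLAIM (what is proved, stated in full; the proofs are below) =====
def Claim_equal_retomandoCusto : Prop := ∀ (matriz : List (List String)) (letras : String), Dom_retomandoCusto matriz letras → Pre_retomandoCusto matriz letras → Spec_retomandoCusto matriz letras (retomandoCusto matriz letras)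

-- ===== LEMMAS AND PROOFS =====

-- multiplicity of a cell (as a character list) among the letters
def pvCnt (L : List Char) (cl : List Char) : Int :=
  (L.countP (fun z => cl = [z]) : Int)

-- A's innermost loop over the letters adds w once per matching letter
theorem pv_fold_letter (L : List Char) (cl : List Char) (w s : Int) :
    L.foldl (fun s z => if cl = [z] then s + w else s + 0) s = s + w * pvCnt L cl := by
  induction L generalizing s with
  | nil => simp [pvCnt]
  | cons a t ih =>
    rw [List.foldl_cons]
    by_cases h : cl = [a]
    · rw [if_pos h, ih]; simp [pvCnt, List.countP_cons, h]; push_cast; ring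
    · rw [if_neg h, ih]; simp [pvCnt, List.countP_cons, h]

-- B's hand-built counter dict looks up exactly that multiplicity
theorem pv_cnt_getD (L : List Char) (d : PySem.Dict (List Char) Int) (cl : List Char) :
    (L.foldl (fun d z => d.insert [z] (d.getD [z] 0 + 1)) d).getD cl 0
      = d.getD cl 0 + pvCnt L cl := by
  induction L generalizing d with
  | nil => simp [pvCnt]
  | cons a t ih =>
    rw [List.foldl_cons, ih, PySem.Dict.getD_insert]
    by_cases h : cl = [a] <;> simp [h, pvCnt, List.countP_cons] <;> push_cast <;> ring

theorem pv_list_sum_range (n : Nat) (f : Nat -> Int) :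
    ((List.range n).map f).sum = Finset.sum (Finset.range n) f := by
  induction n with
  | zero => simp
  | succ m ih => rw [List.range_succ, List.map_append, List.sum_append, Finset.sum_range_succ, ih]; simp

theorem pv_map_sum (n : Nat) (f : Int -> Int) :
    ((PySem.List.pyRange 0 (n : Int) 1).map f).sum
      = Finset.sum (Finset.range n) (fun k => f (k : Int)) := by
  rw [PySem.List.pyRange_zero_natCast, List.map_map]
  exact pv_list_sum_range n (f ∘ fun k => (k : Int))

-- a fold whose step adds g x is init + sum of g
theorem pv_foldl_add_congr (l : List Int) (f : Int -> Int -> Int) (g : Int -> Int)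
    (h : ∀ s x, x ∈ l → f s x = s + g x) (s0 : Int) :
    l.foldl f s0 = s0 + (l.map g).sum := by
  induction l generalizing s0 with
  | nil => simp
  | cons a t ih =>
    rw [List.foldl_cons, h s0 a (List.mem_cons_self), ih (fun s x hx => h s x (List.mem_cons_of_mem a hx))]
    simp [add_assoc]

-- one row of A's loop: column fold + letter fold becomes a weighted sum
theorem pv_fold2 (L : List Char) (cell : Int -> List Char) (wbase : Int) (C : Nat) (s0 : Int) :
    (PySem.List.pyRange 0 (C : Int) 1).foldl (fun soma x =>
        L.foldl (fun s z => if cell x = [z] then s + (wbase + x + 1) else s + 0) soma) s0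
      = s0 + Finset.sum (Finset.range C) (fun x => (wbase + (x : Int) + 1) * pvCnt L (cell (x : Int))) := by
  rw [pv_foldl_add_congr _ _ (fun x => (wbase + x + 1) * pvCnt L (cell x))
        (fun s x _ => pv_fold_letter L (cell x) (wbase + x + 1) s) s0,
      pv_map_sum]

-- A's whole else-branch loop nest as a double sum
theorem pv_fold1 (L : List Char) (cell : Int -> Int -> List Char) (R C : Nat) :
    (PySem.List.pyRange 0 (R : Int) 1).foldl (fun soma i =>
        (PySem.List.pyRange 0 (C : Int) 1).foldl (fun soma x =>
          L.foldl (fun s z => if cell i x = [z] then s + (i + 1 + x + 1) else s + 0) soma) soma) 0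
      = Finset.sum (Finset.range R) (fun i => Finset.sum (Finset.range C)
          (fun x => ((i : Int) + 1 + (x : Int) + 1) * pvCnt L (cell (i : Int) (x : Int)))) := by
  rw [pv_foldl_add_congr _ _
        (fun i => Finset.sum (Finset.range C)
          (fun x => (i + 1 + (x : Int) + 1) * pvCnt L (cell i (x : Int))))
        (fun s i _ => pv_fold2 L (cell i) (i + 1) C s) 0,
      pv_map_sum, zero_add]

-- the row/column split of the weight (i+1)+(x+1)
theorem pv_main (R C : Nat) (c : Nat -> Nat -> Int) :
    Finset.sum (Finset.range R) (fun i => Finset.sum (Finset.range C)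
        (fun x => ((i : Int) + 1 + (x : Int) + 1) * c i x))
      = Finset.sum (Finset.range R) (fun i => ((i : Int) + 1) * Finset.sum (Finset.range C) (fun x => c i x))
        + Finset.sum (Finset.range C) (fun x => ((x : Int) + 1) * Finset.sum (Finset.range R) (fun i => c i x)) := by
  calc Finset.sum (Finset.range R) (fun i => Finset.sum (Finset.range C)
          (fun x => ((i : Int) + 1 + (x : Int) + 1) * c i x))
      = Finset.sum (Finset.range R) (fun i =>
          Finset.sum (Finset.range C) (fun x => ((i : Int) + 1) * c i x)
          + Finset.sum (Finset.range C) (fun x => ((x : Int) + 1) * c i x)) := by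
        refine Finset.sum_congr rfl fun i _ => ?_
        rw [<- Finset.sum_add_distrib]
        exact Finset.sum_congr rfl fun x _ => by ring
    _ = _ := by
        rw [Finset.sum_add_distrib]
        congr 1
        · exact Finset.sum_congr rfl fun i _ => (Finset.mul_sum _ _ _).symm
        · rw [Finset.sum_comm]
          exact Finset.sum_congr rfl fun x _ => (Finset.mul_sum _ _ _).symm

-- ===== VERDICT (by name: the statement is the Claim_ definition above) =====
theorem retomandoCusto_spec : Claim_equal_retomandoCusto := by
  intro matriz letras _ _
  unfold Spec_retomandoCusto retomandoCusto retomandoCusto_alt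
  by_cases hnil : matriz = []
  · subst hnil
    simp [PySem.List.pyRange_one_eq_nil]
  · have hEmp : matriz.isEmpty = false := by simpa using hnil
    simp only [hEmp, Bool.false_eq_true, if_false]
    simp only [pv_cnt_getD, PySem.Dict.getD_empty, zero_add]
    by_cases hlen : matriz.length = 1
    · have hb : (matriz.length == 1) = true := by simp [hlen]
      rw [hb, if_pos rfl]
      rw [pv_fold2 letras.toList
            (fun x => (PySem.List.pyGetD (PySem.List.pyGetD matriz 0 []) x "").toList) 1
            (PySem.List.pyGetD matriz 0 []).length 0, zero_add]
      simp only [pv_map_sum, hlen]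
      rw [<- pv_main 1 (PySem.List.pyGetD matriz 0 []).length
            (fun i x => pvCnt letras.toList
              ((PySem.List.pyGetD (PySem.List.pyGetD matriz (i : Int) []) (x : Int) "").toList))]
      simp only [Finset.sum_range_one, Nat.cast_zero]
      refine Finset.sum_congr rfl fun x _ => by push_cast; ring
    · have hb : (matriz.length == 1) = false := by simpa using hlen
      simp only [hb, Bool.false_eq_true, if_false]
      rw [pv_fold1 letras.toList
            (fun i x => (PySem.List.pyGetD (PySem.List.pyGetD matriz i []) x "").toList)
            matriz.length (PySem.List.pyGetD matriz 0 []).length]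
      simp only [pv_map_sum]
      exact pv_main matriz.length (PySem.List.pyGetD matriz 0 []).length
        (fun i x => pvCnt letras.toList
          ((PySem.List.pyGetD (PySem.List.pyGetD matriz (i : Int) []) (x : Int) "").toList))
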